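-- pv_equiv track=rewrite | github.com/SynthetikzZ/TinyPedal | tinypedal/module/module_relative.py | create_class_standings_index
-- ===== SOURCE A (Python) =====
-- ALL_PLACES = list(range(1, 129))
--
-- def create_class_standings_index(min_top_veh: int, plr_index: int, class_collection: list,
--     veh_limit_other: int, veh_limit_player: int):
--     """Generate class standings index list from class list collection"""
--     for class_list in class_collection:
--         # 0 index, 1 class pos, 2 class name, 3 session best, 4 classes best
--         class_split = list(zip(*class_list))
--         place_index_list = list(zip(class_split[1], class_split[0]))
--         veh_total = class_split[1][-1]  # last pos in class
--
--         if plr_index in class_split[0]: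
--             veh_limit = veh_limit_player
--             local_index = class_split[0].index(plr_index)
--             plr_place = class_split[1][local_index]
--         else:
--             veh_limit = veh_limit_other
--             plr_place = 0
--
--         yield calc_standings_index(
--             min_top_veh, veh_total, veh_limit, plr_place, place_index_list)
--
-- def calc_standings_index(min_top_veh: int, veh_total: int, veh_limit: int,
--     plr_place: int, place_index_list: list):
--     """Calculate vehicle standings index list"""
--     ref_place_list = create_reference_place(min_top_veh, veh_total, plr_place, veh_limit)
--     # Create final standing index list
--     return list(player_index_from_place_reference(ref_place_list, place_index_list))
--
-- def create_reference_place(min_top_veh: int, veh_total: int, plr_place: int, veh_limit: int):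
--     """Create reference place list"""
--     if veh_total <= veh_limit:
--         return ALL_PLACES[:veh_total]
--     if plr_place <= min_top_veh:
--         return ALL_PLACES[:veh_limit]
--     # Find nearby slice range relative to player
--     max_cut_range = veh_limit - min_top_veh
--     # Number of rear slots, should be equal or less than front slots (exclude player slot)
--     rear_cut_count = (max_cut_range - 1) // 2  # exclude player slot, then floor divide
--     front_cut_count = max_cut_range - rear_cut_count  # include player slot
--     # Find front slice limit
--     front_cut_raw = plr_place - front_cut_count
--     if front_cut_raw < min_top_veh:
--         front_cut_raw = min_top_veh
--     # Find rear slice limit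
--     rear_cut_max = front_cut_raw + max_cut_range
--     if rear_cut_max > veh_total:
--         rear_cut_max = veh_total
--     front_cut_max = rear_cut_max - max_cut_range
--     return ALL_PLACES[:min_top_veh] + ALL_PLACES[front_cut_max:rear_cut_max]
--
-- def player_index_from_place_reference(ref_place_list: list, place_index_list: list):
--     """Match place from reference list to generate player index list"""
--     max_places = len(place_index_list)
--     for ref_idx in ref_place_list:
--         if 0 < ref_idx <= max_places:  # prevent out of range
--             yield place_index_list[ref_idx-1][1]  # 1 vehicle index
--         else:
--             break
--     yield -1  # append an empty index as gap between classes
-- ===== SOURCE B (Python) =====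
-- def create_class_standings_index(min_top_veh: int, plr_index: int, class_collection: list,
--     veh_limit_other: int, veh_limit_player: int):
--     """Generate class standings index list from class list collection"""
--     for class_list in class_collection:
--         ids = [row[0] for row in class_list]
--         veh_total = class_list[-1][1]  # last place in class
--         if plr_index in ids:
--             veh_limit = veh_limit_player
--             plr_place = class_list[ids.index(plr_index)][1]
--         else:
--             veh_limit = veh_limit_other
--             plr_place = 0
--         if veh_total <= veh_limit:
--             standings = ids[:veh_total]
--         elif plr_place <= min_top_veh:
--             standings = ids[:veh_limit]
--         else:
--             window = veh_limit - min_top_veh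
--             front_count = window - (window - 1) // 2  # front slots, player included
--             start = max(plr_place - front_count, min_top_veh)
--             end = min(start + window, veh_total)
--             standings = ids[:min_top_veh] + ids[end - window:end]
--         yield standings + [-1]
-- ===== Notes on version B (the rewrite author's own statement) =====
-- stated objective: simpler
-- what changed: B drops A's fixed 128-entry place table, the transposed (place,index) tuple list and the per-place matching generator with its break logic, and builds each class's output directly as one or two slices of the index column plus the -1 sentinel; Pre_ excludes inputs on which A raises (empty class or a row with fewer than two entries) and inputs with a negative min_top_veh, applicable vehicle limit or last class place, or a class of more than 128 rows whose derived bounds exceed 128, where A's slicing of its fixed place table (negative-index wraparound, silent cap at 128) is accidental.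
-- outside the precondition, e.g. on create_class_standings_index(0, 9, [[(5, 1), (7, -2)]], 3, 3): A returns [[5, 7, -1]], B returns [[-1]]; on create_class_standings_index(2, 5, [[(5, 1), (7, 2), (9, 3)]], -1, -1): A returns [[5, 7, 9, -1]], B returns [[5, 7, -1]]
import Mathlib
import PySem

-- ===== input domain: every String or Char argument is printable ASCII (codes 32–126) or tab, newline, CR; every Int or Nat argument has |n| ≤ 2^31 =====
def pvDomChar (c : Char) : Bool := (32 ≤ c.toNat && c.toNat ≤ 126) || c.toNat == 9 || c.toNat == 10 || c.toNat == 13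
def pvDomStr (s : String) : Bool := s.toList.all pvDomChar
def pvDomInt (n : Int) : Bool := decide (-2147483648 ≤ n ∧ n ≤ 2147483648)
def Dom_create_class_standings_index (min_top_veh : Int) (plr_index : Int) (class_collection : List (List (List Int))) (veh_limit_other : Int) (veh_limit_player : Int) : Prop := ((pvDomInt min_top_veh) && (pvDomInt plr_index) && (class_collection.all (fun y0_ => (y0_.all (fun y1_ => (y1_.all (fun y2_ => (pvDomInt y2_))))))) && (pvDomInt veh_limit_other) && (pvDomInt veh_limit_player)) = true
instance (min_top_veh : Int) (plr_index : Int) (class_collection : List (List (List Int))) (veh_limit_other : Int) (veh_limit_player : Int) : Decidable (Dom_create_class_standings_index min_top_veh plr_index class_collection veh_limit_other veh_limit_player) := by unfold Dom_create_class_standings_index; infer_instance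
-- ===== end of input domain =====

-- B drops A's fixed 128-entry place table, the (place, index) tuple list and the per-place
-- matching loop, building each class's output directly as slices of the index column (simpler).

-- ===== PORT A =====

def ALL_PLACES : List Int := PySem.List.pyRange 1 129 1

-- zip(*rows): transpose truncating to the shortest row (columns of the row list)
def zipStar (rows : List (List Int)) : List (List Int) :=
  (List.range ((rows.map List.length).min?.getD 0)).map (fun i => rows.map (fun r => r.getD i 0))

def create_reference_place (min_top_veh : Int) (veh_total : Int) (plr_place : Int) (veh_limit : Int) : List Int :=
  if veh_total ≤ veh_limit then PySem.List.slice ALL_PLACES none (some veh_total)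
  else if plr_place ≤ min_top_veh then PySem.List.slice ALL_PLACES none (some veh_limit)
  else
    let max_cut_range := veh_limit - min_top_veh
    let rear_cut_count := PySem.Int.floordiv (max_cut_range - 1) 2
    let front_cut_count := max_cut_range - rear_cut_count
    let front_cut_raw0 := plr_place - front_cut_count
    let front_cut_raw := if front_cut_raw0 < min_top_veh then min_top_veh else front_cut_raw0
    let rear_cut_max0 := front_cut_raw + max_cut_range
    let rear_cut_max := if rear_cut_max0 > veh_total then veh_total else rear_cut_max0
    let front_cut_max := rear_cut_max - max_cut_range
    PySem.List.slice ALL_PLACES none (some min_top_veh) ++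
      PySem.List.slice ALL_PLACES (some front_cut_max) (some rear_cut_max)

def player_index_from_place_reference (ref_place_list : List Int) (place_index_list : List (Int × Int)) : List Int :=
  match ref_place_list with
  | [] => [-1]
  | ref_idx :: rest =>
      if 0 < ref_idx ∧ ref_idx ≤ (place_index_list.length : Int) then
        (PySem.List.pyGetD place_index_list (ref_idx - 1) (0, 0)).2 ::
          player_index_from_place_reference rest place_index_list
      else [-1]

def calc_standings_index (min_top_veh : Int) (veh_total : Int) (veh_limit : Int)
    (plr_place : Int) (place_index_list : List (Int × Int)) : List Int :=
  player_index_from_place_reference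
    (create_reference_place min_top_veh veh_total plr_place veh_limit) place_index_list

def create_class_standings_index (min_top_veh : Int) (plr_index : Int) (class_collection : List (List (List Int))) (veh_limit_other : Int) (veh_limit_player : Int) : List (List Int) :=
  class_collection.map (fun class_list =>
    let class_split := zipStar class_list
    let cs0 := class_split.getD 0 []
    let cs1 := class_split.getD 1 []
    let place_index_list := cs1.zip cs0
    let veh_total := PySem.List.pyGetD cs1 (-1) 0
    let vp : Int × Int :=
      if cs0.contains plr_index then
        (veh_limit_player, PySem.List.pyGetD cs1 (((PySem.List.index? cs0 plr_index).getD 0 : Nat) : Int) 0)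
      else (veh_limit_other, 0)
    calc_standings_index min_top_veh veh_total vp.1 vp.2 place_index_list)

-- ===== PORT B =====
-- (row accesses row[0] / row[1] are .getD, exact on Pre_'s domain of rows with ≥ 2 entries)

def create_class_standings_index_alt (min_top_veh : Int) (plr_index : Int) (class_collection : List (List (List Int))) (veh_limit_other : Int) (veh_limit_player : Int) : List (List Int) :=
  class_collection.map (fun class_list =>
    let ids := class_list.map (fun r => r.getD 0 0)
    let veh_total := (PySem.List.pyGetD class_list (-1) []).getD 1 0
    let vp : Int × Int :=
      if ids.contains plr_index then
        (veh_limit_player, (class_list.getD ((PySem.List.index? ids plr_index).getD 0) []).getD 1 0)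
      else (veh_limit_other, 0)
    let standings :=
      if veh_total ≤ vp.1 then PySem.List.slice ids none (some veh_total)
      else if vp.2 ≤ min_top_veh then PySem.List.slice ids none (some vp.1)
      else
        let window := vp.1 - min_top_veh
        let front_count := window - PySem.Int.floordiv (window - 1) 2
        let start := max (vp.2 - front_count) min_top_veh
        let stop := min (start + window) veh_total
        PySem.List.slice ids none (some min_top_veh) ++
          PySem.List.slice ids (some (stop - window)) (some stop)
    standings ++ [-1])

-- ===== PRECONDITION & SPEC =====
-- input-derived quantities Pre_ talks about (the class's id column, limit, last and player place)
def classIds (cl : List (List Int)) : List Int := cl.map (fun r => r.getD 0 0)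
def classLastPlace (cl : List (List Int)) : Int :=
  (PySem.List.pyGetD cl (-1) ([] : List Int)).getD 1 0
def classLimit (plr_index veh_limit_other veh_limit_player : Int) (cl : List (List Int)) : Int :=
  if (classIds cl).contains plr_index then veh_limit_player else veh_limit_other
def classPlayerPlace (plr_index : Int) (cl : List (List Int)) : Int :=
  if (classIds cl).contains plr_index then
    (cl.getD ((PySem.List.index? (classIds cl) plr_index).getD 0) ([] : List Int)).getD 1 0
  else 0

-- Pre_ excludes inputs on which A raises IndexError (an empty class, or a row with fewer than two
-- entries), and inputs whose governing cut bound (last class place, applicable vehicle limit, or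
-- min_top_veh) is negative or, for a class of more than 128 rows, exceeds 128 — there A's slicing
-- of its fixed 128-entry place table (negative-index wraparound, silent cap at 128) is accidental.
def Pre_create_class_standings_index (min_top_veh : Int) (plr_index : Int) (class_collection : List (List (List Int))) (veh_limit_other : Int) (veh_limit_player : Int) : Prop :=
  ∀ cl ∈ class_collection, cl ≠ [] ∧ (∀ row ∈ cl, 2 ≤ row.length) ∧
    (if classLastPlace cl ≤ classLimit plr_index veh_limit_other veh_limit_player cl then
      0 ≤ classLastPlace cl ∧ ((cl.length : Int) ≤ 128 ∨ classLastPlace cl ≤ 128)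
    else
      0 ≤ classLimit plr_index veh_limit_other veh_limit_player cl ∧
        (if classPlayerPlace plr_index cl ≤ min_top_veh then
          ((cl.length : Int) ≤ 128 ∨ classLimit plr_index veh_limit_other veh_limit_player cl ≤ 128)
        else
          0 ≤ min_top_veh ∧
            ((cl.length : Int) ≤ 128 ∨ (min_top_veh ≤ 128 ∧ classLastPlace cl ≤ 128))))
instance (min_top_veh : Int) (plr_index : Int) (class_collection : List (List (List Int))) (veh_limit_other : Int) (veh_limit_player : Int) : Decidable (Pre_create_class_standings_index min_top_veh plr_index class_collection veh_limit_other veh_limit_player) := by unfold Pre_create_class_standings_index; infer_instance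

def pvWitness_create_class_standings_index : Int × Int × List (List (List Int)) × Int × Int :=
  (2, 5, [[[5, 1], [7, 2]], [[3, 1], [9, 2], [11, 3]]], 3, 4)

def Spec_create_class_standings_index (min_top_veh : Int) (plr_index : Int) (class_collection : List (List (List Int))) (veh_limit_other : Int) (veh_limit_player : Int) (out : List (List Int)) : Prop := out = create_class_standings_index_alt min_top_veh plr_index class_collection veh_limit_other veh_limit_player
instance (min_top_veh : Int) (plr_index : Int) (class_collection : List (List (List Int))) (veh_limit_other : Int) (veh_limit_player : Int) (out : List (List Int)) : Decidable (Spec_create_class_standings_index min_top_veh plr_index class_collection veh_limit_other veh_limit_player out) := by unfold Spec_create_class_standings_index; infer_instance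

-- ===== CLAIM (what is proved, stated in full; the proofs are below) =====
def Claim_equal_create_class_standings_index : Prop := ∀ (min_top_veh : Int) (plr_index : Int) (class_collection : List (List (List Int))) (veh_limit_other : Int) (veh_limit_player : Int), Dom_create_class_standings_index min_top_veh plr_index class_collection veh_limit_other veh_limit_player → Pre_create_class_standings_index min_top_veh plr_index class_collection veh_limit_other veh_limit_player → Spec_create_class_standings_index min_top_veh plr_index class_collection veh_limit_other veh_limit_player (create_class_standings_index min_top_veh plr_index class_collection veh_limit_other veh_limit_player)

-- ===== LEMMAS AND PROOFS =====

-- pyCut i = the index at which a bound i cuts A's 128-entry place table (Python slice clamping)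
def pyCut (i : Int) : Nat := (min (max (if i < 0 then i + 128 else i) 0) 128).toNat

theorem pyCut_eq_clampIdx (i : Int) : pyCut i = PySem.List.clampIdx 128 i := by
  simp only [pyCut, PySem.List.clampIdx]
  split_ifs <;> omega

theorem pyCut_le (i : Int) : pyCut i ≤ 128 := by
  simp only [pyCut]; omega

theorem pyCut_toNat (i : Int) (h0 : 0 ≤ i) (h1 : i ≤ 128) : pyCut i = i.toNat := by
  simp only [pyCut]
  rw [if_neg (by omega)]
  omega

-- general unfoldings of slice with arbitrary Int bounds
theorem slice_none_some_eq (xs : List Int) (b : Int) :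
    PySem.List.slice xs none (some b) = xs.take (PySem.List.clampIdx xs.length b) := by
  simp [PySem.List.slice, PySem.List.clampIdx]

theorem slice_some_some_eq (xs : List Int) (a b : Int) :
    PySem.List.slice xs (some a) (some b) =
      (xs.drop (PySem.List.clampIdx xs.length a)).take
        (PySem.List.clampIdx xs.length b - PySem.List.clampIdx xs.length a) := by
  simp [PySem.List.slice, PySem.List.clampIdx]

theorem len_ALL : ALL_PLACES.length = 128 := by
  simp [ALL_PLACES, PySem.List.length_pyRange_one]

-- a clamped drop/take of the place table is a contiguous run of places s+1 .. s+k
theorem drop_take_ALL (s k : Nat) (hk : s + k <= 128) :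
    (ALL_PLACES.drop s).take k =
      PySem.List.pyRange ((s : Int) + 1) ((s : Int) + 1 + (k : Int)) 1 := by
  apply List.ext_getElem
  · simp [len_ALL, PySem.List.length_pyRange_one]; omega
  · intro i h1 h2
    simp only [List.getElem_take, List.getElem_drop]
    rw [PySem.List.getElem_pyRange_one]
    have hi : i < k := by have := h1; simp [len_ALL] at this; omega
    have : s + i < ALL_PLACES.length := by rw [len_ALL]; omega
    rw [show (ALL_PLACES[s + i]'this : Int) = 1 + (s + i) from ?_]
    · omega
    · have h3 : s + i < (PySem.List.pyRange 1 129 1).length := by simpa [ALL_PLACES] using this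
      have := PySem.List.getElem_pyRange_one (a := 1) (b := 129) (k := s + i) (h := h3)
      simp only [ALL_PLACES]; exact this

theorem take_ALL (e : Nat) (he : e <= 128) :
    ALL_PLACES.take e = PySem.List.pyRange 1 (1 + (e : Int)) 1 := by
  have := drop_take_ALL 0 e (by omega)
  simpa using this

-- the matching loop on a fully in-range run of places
theorem pifpr_run_ok (P : List (Int × Int)) (ys : List Int) (a : Int) (e : Nat)
    (ha : 1 <= a) (h : a + e <= (P.length : Int) + 1) :
    player_index_from_place_reference (PySem.List.pyRange a (a + e) 1 ++ ys) P =
      (PySem.List.pyRange a (a + e) 1).map (fun p => (PySem.List.pyGetD P (p - 1) (0, 0)).2) ++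
        player_index_from_place_reference ys P := by
  induction e generalizing a with
  | zero =>
      rw [PySem.List.pyRange_one_eq_nil (by omega)]
      simp
  | succ e ih =>
      rw [show ((e + 1 : Nat) : Int) = (e : Int) + 1 by push_cast; ring,
          show a + ((e : Int) + 1) = a + 1 + (e : Int) by ring]
      rw [PySem.List.pyRange_one_cons (by omega)]
      rw [List.cons_append, player_index_from_place_reference]
      rw [if_pos ⟨by omega, by push_cast at h; omega⟩]
      rw [ih (a + 1) (by omega) (by push_cast at h ⊢; omega)]
      simp

-- the matching loop on a run that overruns the list: it stops at the first out-of-range place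
theorem pifpr_run_over (P : List (Int × Int)) (ys : List Int) (a : Int) (e : Nat)
    (ha : 1 <= a) (he : 1 <= e) (h : (P.length : Int) + 1 < a + e) :
    player_index_from_place_reference (PySem.List.pyRange a (a + e) 1 ++ ys) P =
      (PySem.List.pyRange a ((P.length : Int) + 1) 1).map
          (fun p => (PySem.List.pyGetD P (p - 1) (0, 0)).2) ++ [-1] := by
  induction e generalizing a with
  | zero => omega
  | succ e ih =>
      rw [show ((e + 1 : Nat) : Int) = (e : Int) + 1 by push_cast; ring,
          show a + ((e : Int) + 1) = a + 1 + (e : Int) by ring]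
      rw [PySem.List.pyRange_one_cons (by omega)]
      rw [List.cons_append, player_index_from_place_reference]
      by_cases hle : a <= (P.length : Int)
      · rw [if_pos ⟨by omega, hle⟩]
        have he1 : 1 <= e := by push_cast at h; omega
        rw [ih (a + 1) (by omega) he1 (by push_cast at h ⊢; omega)]
        rw [PySem.List.pyRange_one_cons (show a < (P.length : Int) + 1 by omega), List.map_cons]
        simp
      · rw [if_neg (by omega)]
        rw [PySem.List.pyRange_one_eq_nil (by omega)]
        simp

theorem pifpr_nil (P : List (Int × Int)) : player_index_from_place_reference [] P = [-1] := rfl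

theorem pifpr_run_ok' (P : List (Int × Int)) (a : Int) (e : Nat)
    (ha : 1 <= a) (h : a + e <= (P.length : Int) + 1) :
    player_index_from_place_reference (PySem.List.pyRange a (a + e) 1) P =
      (PySem.List.pyRange a (a + e) 1).map (fun p => (PySem.List.pyGetD P (p - 1) (0, 0)).2) ++
        [-1] := by
  have := pifpr_run_ok P [] a e ha h
  simpa [pifpr_nil] using this

theorem pifpr_run_over' (P : List (Int × Int)) (a : Int) (e : Nat)
    (ha : 1 <= a) (he : 1 <= e) (h : (P.length : Int) + 1 < a + e) :
    player_index_from_place_reference (PySem.List.pyRange a (a + e) 1) P =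
      (PySem.List.pyRange a ((P.length : Int) + 1) 1).map
          (fun p => (PySem.List.pyGetD P (p - 1) (0, 0)).2) ++ [-1] := by
  have := pifpr_run_over P [] a e ha he h
  simpa using this

-- looking places s+1 .. s+e up in zip(poss, ids) is slicing ids
theorem map_f_zip (ids poss : List Int) (hlen : poss.length = ids.length) (s e : Nat)
    (h : s + e <= ids.length) :
    (PySem.List.pyRange ((s : Int) + 1) ((s : Int) + 1 + (e : Int)) 1).map
        (fun p => (PySem.List.pyGetD (poss.zip ids) (p - 1) (0, 0)).2) =
      (ids.drop s).take e := by
  induction e generalizing s with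
  | zero => simp [PySem.List.pyRange_one_eq_nil]
  | succ e ih =>
      rw [show ((e + 1 : Nat) : Int) = (e : Int) + 1 by push_cast; ring,
          show (s : Int) + 1 + ((e : Int) + 1) = ((s : Int) + 1) + 1 + (e : Int) by ring]
      rw [PySem.List.pyRange_one_cons (by omega)]
      rw [List.map_cons]
      have hs : s < ids.length := by omega
      have hz : s < (poss.zip ids).length := by simp [List.length_zip]; omega
      have h1 : (PySem.List.pyGetD (poss.zip ids) ((s : Int) + 1 - 1) (0, 0)).2 = ids[s] := by
        rw [show ((s : Int) + 1 - 1) = (s : Int) by ring]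
        rw [PySem.List.pyGetD_natCast]
        rw [List.getD_eq_getElem?_getD, List.getElem?_eq_getElem hz]
        simp
      rw [h1]
      rw [show ((s : Int) + 1) + 1 = ((s + 1 : Nat) : Int) + 1 by push_cast; ring]
      rw [ih (s + 1) (by omega)]
      rw [List.drop_eq_getElem_cons hs, List.take_succ_cons]

theorem map_f_zip_zero (ids poss : List Int) (hlen : poss.length = ids.length) (e : Nat)
    (h : e <= ids.length) :
    (PySem.List.pyRange 1 (1 + (e : Int)) 1).map
        (fun p => (PySem.List.pyGetD (poss.zip ids) (p - 1) (0, 0)).2) =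
      ids.take e := by
  have := map_f_zip ids poss hlen 0 e (by omega)
  simpa using this

-- the A-side per-class computation, characterised as clamped slices of ids
theorem core_standings (ids poss : List Int) (hlen : poss.length = ids.length)
    (hn : 1 <= ids.length) (mtv vt vl pp : Int) :
    calc_standings_index mtv vt vl pp (poss.zip ids) =
      (if vt <= vl then ids.take (pyCut vt)
       else if pp <= mtv then ids.take (pyCut vl)
       else
         let max_cut_range := vl - mtv
         let rear_cut_count := PySem.Int.floordiv (max_cut_range - 1) 2
         let front_cut_count := max_cut_range - rear_cut_count
         let front_cut_raw := max (pp - front_cut_count) mtv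
         let rear_cut_max := min (front_cut_raw + max_cut_range) vt
         let front_cut_max := rear_cut_max - max_cut_range
         let top := pyCut mtv
         if top <= ids.length then
           ids.take top ++
             (ids.drop (pyCut front_cut_max)).take (pyCut rear_cut_max - pyCut front_cut_max)
         else ids) ++ [-1] := by
  have hP : (poss.zip ids).length = ids.length := by simp [List.length_zip, hlen]
  unfold calc_standings_index create_reference_place
  by_cases hb1 : vt <= vl
  · rw [if_pos hb1, if_pos hb1]
    rw [slice_none_some_eq, len_ALL, ← pyCut_eq_clampIdx]
    rw [take_ALL _ (pyCut_le vt)]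
    by_cases hcase : pyCut vt <= ids.length
    · rw [pifpr_run_ok' (poss.zip ids) 1 (pyCut vt) (le_refl 1) (by rw [hP]; omega)]
      rw [map_f_zip_zero ids poss hlen _ hcase]
    · rw [pifpr_run_over' (poss.zip ids) 1 (pyCut vt) (le_refl 1) (by omega)
          (by rw [hP]; omega)]
      rw [hP, show ((ids.length : Int) + 1) = 1 + (ids.length : Int) by ring]
      rw [map_f_zip_zero ids poss hlen ids.length (le_refl ids.length)]
      rw [List.take_length, List.take_of_length_le (by omega)]
  · rw [if_neg hb1, if_neg hb1]
    by_cases hb2 : pp <= mtv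
    · rw [if_pos hb2, if_pos hb2]
      rw [slice_none_some_eq, len_ALL, ← pyCut_eq_clampIdx]
      rw [take_ALL _ (pyCut_le vl)]
      by_cases hcase : pyCut vl <= ids.length
      · rw [pifpr_run_ok' (poss.zip ids) 1 (pyCut vl) (le_refl 1) (by rw [hP]; omega)]
        rw [map_f_zip_zero ids poss hlen _ hcase]
      · rw [pifpr_run_over' (poss.zip ids) 1 (pyCut vl) (le_refl 1) (by omega)
            (by rw [hP]; omega)]
        rw [hP, show ((ids.length : Int) + 1) = 1 + (ids.length : Int) by ring]
        rw [map_f_zip_zero ids poss hlen ids.length (le_refl ids.length)]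
        rw [List.take_length, List.take_of_length_le (by omega)]
    · rw [if_neg hb2, if_neg hb2]
      dsimp only
      set C := vl - mtv with hC
      set R := PySem.Int.floordiv (C - 1) 2 with hR
      set F := C - R with hF
      have hfcr : (if pp - F < mtv then mtv else pp - F) = max (pp - F) mtv := by
        rw [max_def]; split_ifs <;> omega
      rw [hfcr]
      set G := max (pp - F) mtv with hG
      have hrcm : (if G + C > vt then vt else G + C) = min (G + C) vt := by
        rw [min_def]; split_ifs <;> omega
      rw [hrcm]
      set M := min (G + C) vt with hM
      simp only [slice_none_some_eq, slice_some_some_eq, len_ALL, ← pyCut_eq_clampIdx]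
      set e1 := pyCut mtv with he1def
      set s := pyCut (M - C) with hsdef
      set t := pyCut M with htdef
      have he1 : e1 <= 128 := pyCut_le mtv
      have hsle : s <= 128 := pyCut_le (M - C)
      have htle : t <= 128 := pyCut_le M
      rw [take_ALL e1 he1, drop_take_ALL s (t - s) (by omega)]
      by_cases h1 : e1 <= ids.length
      · rw [pifpr_run_ok (poss.zip ids) _ 1 e1 (le_refl 1) (by rw [hP]; omega)]
        rw [map_f_zip_zero ids poss hlen e1 h1]
        rw [if_pos h1]
        have hrun2 : player_index_from_place_reference
            (PySem.List.pyRange ((s : Int) + 1) ((s : Int) + 1 + ((t - s : Nat) : Int)) 1)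
            (poss.zip ids) = (ids.drop s).take (t - s) ++ [-1] := by
          by_cases h2 : s + (t - s) <= ids.length
          · rw [pifpr_run_ok' (poss.zip ids) ((s : Int) + 1) (t - s) (by omega)
                (by rw [hP]; omega)]
            rw [map_f_zip ids poss hlen s (t - s) h2]
          · by_cases hk : t - s = 0
            · rw [hk]
              simp [PySem.List.pyRange_one_eq_nil, pifpr_nil]
            · rw [pifpr_run_over' (poss.zip ids) ((s : Int) + 1) (t - s) (by omega) (by omega)
                  (by rw [hP]; omega)]
              rw [hP]
              by_cases hsn : s <= ids.length
              · rw [show ((ids.length : Int) + 1) = ((s : Int) + 1) + ((ids.length - s : Nat) : Int)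
                    by omega]
                rw [map_f_zip ids poss hlen s (ids.length - s) (by omega)]
                rw [List.take_of_length_le (by simp [List.length_drop]),
                    List.take_of_length_le (by simp [List.length_drop]; omega)]
              · rw [PySem.List.pyRange_one_eq_nil (by omega)]
                rw [List.drop_eq_nil_of_le (by omega)]
                simp
        rw [hrun2, ← List.append_assoc]
      · rw [pifpr_run_over (poss.zip ids) _ 1 e1 (le_refl 1) (by omega) (by rw [hP]; omega)]
        rw [hP, show ((ids.length : Int) + 1) = 1 + (ids.length : Int) by ring]
        rw [map_f_zip_zero ids poss hlen ids.length (le_refl ids.length), List.take_length]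
        rw [if_neg h1]

-- pyCut helper facts
theorem pyCut_128 (i : Int) (h : 128 < i) : pyCut i = 128 := by
  simp only [pyCut]; rw [if_neg (by omega)]; omega

theorem pyCut_ge (i : Int) (h0 : 0 ≤ i) : min i.toNat 128 ≤ pyCut i := by
  simp only [pyCut]; rw [if_neg (by omega)]; omega

-- taking pyCut v of a list that fits the table (or a bound that does) is taking v
theorem take_eq_cut (l : List Int) (v : Int) (hv0 : 0 ≤ v)
    (hs : (l.length : Int) ≤ 128 ∨ v ≤ 128) : l.take (pyCut v) = l.take v.toNat := by
  by_cases hv : v ≤ 128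
  · rw [pyCut_toNat v hv0 hv]
  · have hn : l.length ≤ 128 := by omega
    rw [pyCut_128 v (by omega), List.take_of_length_le (by omega),
        List.take_of_length_le (by omega)]

-- the table-clamped drop/take equals the plain drop/take of ids
theorem drop_take_eq_cut (l : List Int) (F M : Int) (hF0 : 0 ≤ F) (hM0 : 0 ≤ M)
    (hs : (l.length : Int) ≤ 128 ∨ M ≤ 128) :
    (l.drop (pyCut F)).take (pyCut M - pyCut F) =
      (l.drop F.toNat).take (M.toNat - F.toNat) := by
  by_cases hF : F ≤ 128
  · rw [pyCut_toNat F hF0 hF]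
    by_cases hM : M ≤ 128
    · rw [pyCut_toNat M hM0 hM]
    · have hn : l.length ≤ 128 := by omega
      rw [pyCut_128 M (by omega)]
      rw [List.take_of_length_le (by simp [List.length_drop]; omega),
          List.take_of_length_le (by simp [List.length_drop]; omega)]
  · rw [pyCut_128 F (by omega)]
    by_cases hM : M ≤ 128
    · have h1 : pyCut M - 128 = 0 := by have := pyCut_le M; omega
      rw [h1, show M.toNat - F.toNat = 0 by omega]
      simp
    · have hn : l.length ≤ 128 := by omega
      rw [List.drop_eq_nil_of_le (by omega), List.drop_eq_nil_of_le (by omega)]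
      simp

-- inside Pre_'s bounds, A's clamped-slice form equals B's direct slices of ids
theorem bridge (ids : List Int) (mtv vt vl pp : Int)
    (hyp : if vt ≤ vl then 0 ≤ vt ∧ ((ids.length : Int) ≤ 128 ∨ vt ≤ 128)
      else 0 ≤ vl ∧
        (if pp ≤ mtv then ((ids.length : Int) ≤ 128 ∨ vl ≤ 128)
         else 0 ≤ mtv ∧ ((ids.length : Int) ≤ 128 ∨ (mtv ≤ 128 ∧ vt ≤ 128)))) :
    (if vt <= vl then ids.take (pyCut vt)
     else if pp <= mtv then ids.take (pyCut vl)
     else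
       let max_cut_range := vl - mtv
       let rear_cut_count := PySem.Int.floordiv (max_cut_range - 1) 2
       let front_cut_count := max_cut_range - rear_cut_count
       let front_cut_raw := max (pp - front_cut_count) mtv
       let rear_cut_max := min (front_cut_raw + max_cut_range) vt
       let front_cut_max := rear_cut_max - max_cut_range
       let top := pyCut mtv
       if top <= ids.length then
         ids.take top ++
           (ids.drop (pyCut front_cut_max)).take (pyCut rear_cut_max - pyCut front_cut_max)
       else ids) =
    (if vt ≤ vl then PySem.List.slice ids none (some vt)
     else if pp ≤ mtv then PySem.List.slice ids none (some vl)
     else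
       let window := vl - mtv
       let front_count := window - PySem.Int.floordiv (window - 1) 2
       let start := max (pp - front_count) mtv
       let stop := min (start + window) vt
       PySem.List.slice ids none (some mtv) ++
         PySem.List.slice ids (some (stop - window)) (some stop)) := by
  by_cases hb1 : vt ≤ vl
  · rw [if_pos hb1] at hyp
    obtain ⟨hv0, hsv⟩ := hyp
    rw [if_pos hb1, if_pos hb1, PySem.List.slice_to _ hv0]
    exact take_eq_cut ids vt hv0 hsv
  · rw [if_neg hb1] at hyp
    obtain ⟨hl0, hyp⟩ := hyp
    rw [if_neg hb1, if_neg hb1]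
    by_cases hb2 : pp ≤ mtv
    · rw [if_pos hb2] at hyp
      rw [if_pos hb2, if_pos hb2, PySem.List.slice_to _ hl0]
      exact take_eq_cut ids vl hl0 hyp
    · rw [if_neg hb2] at hyp
      obtain ⟨hm0, hsz⟩ := hyp
      rw [if_neg hb2, if_neg hb2]
      dsimp only
      set C := vl - mtv with hC
      set R := PySem.Int.floordiv (C - 1) 2 with hR
      set G := max (pp - (C - R)) mtv with hG
      set M := min (G + C) vt with hM
      have hGm : mtv ≤ G := le_max_right _ _
      have hMlo : mtv + C ≤ M := le_min (by omega) (by omega)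
      have hMhi : M ≤ vt := min_le_right _ _
      have hF0 : 0 ≤ M - C := by omega
      have hM0 : 0 ≤ M := by omega
      rw [PySem.List.slice_to _ hm0, PySem.List.slice_toNat _ hF0 hM0]
      by_cases h1 : pyCut mtv ≤ ids.length
      · rw [if_pos h1]
        congr 1
        · exact take_eq_cut ids mtv hm0 (hsz.imp id (fun h => h.1))
        · exact drop_take_eq_cut ids (M - C) M hF0 hM0
            (hsz.imp id (fun h => by omega))
      · rw [if_neg h1]
        have hge := pyCut_ge mtv hm0
        have hlen : ids.length < mtv.toNat := by
          by_cases hc : mtv ≤ 128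
          · rw [pyCut_toNat mtv hm0 hc] at h1; omega
          · rw [pyCut_128 mtv (by omega)] at h1; omega
        rw [List.take_of_length_le (by omega)]
        rw [List.drop_eq_nil_of_le (by omega)]
        simp

-- shape lemmas for the per-class data
theorem min_len_ge_two (cl : List (List Int)) (hne : cl ≠ [])
    (hrow : ∀ row ∈ cl, 2 <= row.length) : 2 <= (cl.map List.length).min?.getD 0 := by
  have hmapne : cl.map List.length ≠ [] := by simpa using hne
  cases hmin : (cl.map List.length).min? with
  | none => exact absurd (List.min?_eq_none_iff.mp hmin) hmapne
  | some v =>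
      have hv := List.min?_mem hmin
      obtain ⟨r, hr, hrv⟩ := List.mem_map.mp hv
      simp only [Option.getD_some]
      exact hrv ▸ hrow r hr

theorem zipStar_getD (cl : List (List Int)) (i : Nat)
    (hi : i < (cl.map List.length).min?.getD 0) :
    (zipStar cl).getD i [] = cl.map (fun r => r.getD i 0) := by
  unfold zipStar
  rw [List.getD_eq_getElem?_getD, List.getElem?_map, List.getElem?_range hi]
  rfl

-- B's last-row place equals the last entry of the place column
theorem last_row_place (cl : List (List Int)) (hne : cl ≠ []) :
    (PySem.List.pyGetD cl (-1) ([] : List Int)).getD 1 0 =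
      (cl.map (fun r => r.getD 1 0)).getLast?.getD 0 := by
  rw [PySem.List.pyGetD_neg_one (h := hne)]
  rw [List.getLast?_map]
  rw [List.getLast?_eq_some_getLast (h := hne)]
  rfl

-- B's indexed-row place equals the indexed entry of the place column
theorem row_place (cl : List (List Int)) (i : Nat) (hi : i < cl.length) :
    (cl.getD i ([] : List Int)).getD 1 0 = (cl.map (fun r => r.getD 1 0)).getD i 0 := by
  simp only [List.getD_eq_getElem?_getD, List.getElem?_eq_getElem hi, Option.getD_some]
  simp [List.getElem?_map, List.getElem?_eq_getElem hi]

-- ===== VERDICT (by name: the statement is the Claim_ definition above) =====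
theorem create_class_standings_index_spec : Claim_equal_create_class_standings_index := by
  intro mtv plr coll vlo vlp _hdom hpre
  unfold Pre_create_class_standings_index at hpre
  unfold Spec_create_class_standings_index create_class_standings_index
    create_class_standings_index_alt
  refine List.map_congr_left fun cl hcl => ?_
  obtain ⟨hne, hrow, hcond⟩ := hpre cl hcl
  dsimp only
  have hm2 := min_len_ge_two cl hne hrow
  rw [zipStar_getD cl 0 (by omega), zipStar_getD cl 1 (by omega)]
  set ids := cl.map (fun r => r.getD 0 0) with hids
  set poss := cl.map (fun r => r.getD 1 0) with hposs
  have hpne : poss ≠ [] := by simp [hposs]; exact hne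
  have hvtA : PySem.List.pyGetD poss (-1) 0 = poss.getLast?.getD 0 := by
    have := PySem.List.pyGetD_neg_one (xs := poss) (d := (0 : Int)) hpne
    rw [this, List.getLast?_eq_some_getLast (h := hpne)]
    rfl
  rw [hvtA]
  have hvtB : (PySem.List.pyGetD cl (-1) ([] : List Int)).getD 1 0 = poss.getLast?.getD 0 :=
    last_row_place cl hne
  rw [hvtB]
  set vt := poss.getLast?.getD 0 with hvt
  have hlen : poss.length = ids.length := by simp [hids, hposs]
  have hn : 1 <= ids.length := by
    have := List.length_pos_of_ne_nil hne
    simp [hids]; omega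
  -- align the (veh_limit, plr_place) pair of the two sides
  have hvp : (if ids.contains plr then
        (vlp, PySem.List.pyGetD poss (((PySem.List.index? ids plr).getD 0 : Nat) : Int) 0)
      else (vlo, 0)) =
      (if ids.contains plr then
        (vlp, (cl.getD ((PySem.List.index? ids plr).getD 0) ([] : List Int)).getD 1 0)
      else (vlo, 0)) := by
    by_cases hc : ids.contains plr
    · rw [if_pos hc, if_pos hc]
      have hmem : plr ∈ ids := by simpa using hc
      have hsome : (PySem.List.index? ids plr).isSome := by
        rw [PySem.List.index?_isSome_iff]; exact hmem
      obtain ⟨k, hk⟩ : ∃ k, PySem.List.index? ids plr = some k :=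
        Option.isSome_iff_exists.mp hsome
      obtain ⟨hklt, -, -⟩ := PySem.List.getElem_of_index?_eq_some hk
      have hkcl : k < cl.length := by simpa [hids] using hklt
      rw [hk]
      simp only [Option.getD_some]
      rw [PySem.List.pyGetD_natCast, row_place cl k hkcl]
    · rw [if_neg hc, if_neg hc]
  rw [← hvp]
  set vp := (if ids.contains plr then
      (vlp, PySem.List.pyGetD poss (((PySem.List.index? ids plr).getD 0 : Nat) : Int) 0)
    else (vlo, 0)) with hvpdef
  -- translate Pre_'s per-class condition to the (vt, vp) values of the two sides
  have e1 : classLastPlace cl = vt := hvtB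
  have e2 : classLimit plr vlo vlp cl = vp.1 := by
    simp only [classLimit, classIds, ← hids, hvpdef]
    split_ifs <;> rfl
  have e3 : classPlayerPlace plr cl = vp.2 := by
    rw [hvp]
    simp only [classPlayerPlace, classIds, ← hids]
    split_ifs <;> rfl
  rw [e1, e2, e3] at hcond
  have hnlen : (ids.length : Int) = (cl.length : Int) := by simp [hids]
  rw [← hnlen] at hcond
  rw [core_standings ids poss hlen hn mtv vt vp.1 vp.2]
  congr 1
  exact bridge ids mtv vt vp.1 vp.2 hcond
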